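-- pv_equiv track=rewrite | github.com/Sudo-Biao/suanga | core/fengshui/calculator.py | calculate_ming_gua
-- ===== SOURCE A (Python) =====
-- def calculate_ming_gua(birth_year: int, gender: str) -> int:
--     """
--     Calculate the Ming Gua (命卦) number for a person.
--     Uses the traditional formula:
--       Male:   (10 - (year digit sum % 9)) % 9, or 9 if result = 0
--       Female: (year digit sum + 5) % 9, or 9 if result = 0
--       After 2000: male subtract from 9 instead of 10.
--     """
--     # Sum year digits until single digit
--     y = birth_year % 100  # last 2 digits
--     while y >= 10:
--         y = sum(int(d) for d in str(y))
--     if y == 0: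
--         y = 9
--
--     male = gender in ("male", "男")
--
--     if birth_year < 2000:
--         gua = (10 - y) % 9 if male else (y + 5) % 9
--     else:
--         gua = (9 - y) % 9 if male else (y + 6) % 9
--
--     if gua == 0:
--         gua = 9
--     if gua == 5:
--         gua = 2 if male else 8   # 5 is converted to 2(male) or 8(female)
--
--     return gua
-- ===== SOURCE B (Python) =====
-- def calculate_ming_gua(birth_year: int, gender: str) -> int:
--     # Closed-form digital root of the last two year digits (loop-free).
--     y = birth_year % 100 % 9 or 9
--     male = gender in ("male", "男")
--     if male:
--         base = (10 if birth_year < 2000 else 9) - y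
--     else:
--         base = y + (5 if birth_year < 2000 else 6)
--     gua = base % 9 or 9
--     if gua == 5:
--         gua = 2 if male else 8
--     return gua
-- ===== Notes on version B (the rewrite author's own statement) =====
-- stated objective: simpler
-- what changed: The iterative digit-sum-until-single-digit while loop is replaced by a closed-form digital root (y % 100 % 9, with 0 mapped to 9), and the pre/post-2000 x male branches are folded into one offset expression.
import Mathlib
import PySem

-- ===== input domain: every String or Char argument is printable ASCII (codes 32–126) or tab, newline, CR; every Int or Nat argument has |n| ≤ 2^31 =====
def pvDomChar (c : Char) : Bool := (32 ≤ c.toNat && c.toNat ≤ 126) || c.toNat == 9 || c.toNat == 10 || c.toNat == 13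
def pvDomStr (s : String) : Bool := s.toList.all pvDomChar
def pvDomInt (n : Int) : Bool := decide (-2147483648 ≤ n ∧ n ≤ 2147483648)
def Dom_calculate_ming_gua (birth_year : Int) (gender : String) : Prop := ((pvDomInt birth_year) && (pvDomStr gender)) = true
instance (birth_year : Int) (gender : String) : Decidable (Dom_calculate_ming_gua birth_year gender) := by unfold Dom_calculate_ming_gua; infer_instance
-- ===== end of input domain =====

-- B replaces A's iterative digit-sum while loop by the closed-form digital root
-- y % 100 % 9 (0 ↦ 9) and folds the pre/post-2000 × gender branches into one offset; objective: simpler.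

-- ===== PORT A =====
-- sum(int(d) for d in str(y)); exact here: str(y) of the nonnegative y reached in the loop
-- consists of digits only, so ofStr? is always some.
def pvDigitSum (y : Int) : Int :=
  ((PySem.Int.toStr y).toList.map (fun c => (PySem.Int.ofStr? (String.ofList [c])).getD 0)).sum

-- the `while y >= 10` loop; the fuel only makes the loop total (y starts in [0,100), two
-- iterations always suffice; 100 is a safe bound)
def pvDigitLoop : Nat → Int → Int
  | 0, y => y
  | n + 1, y => if y ≥ 10 then pvDigitLoop n (pvDigitSum y) else y

def calculate_ming_gua (birth_year : Int) (gender : String) : Int :=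
  let y0 := PySem.Int.mod birth_year 100
  let y1 := pvDigitLoop 100 y0
  let y : Int := if y1 = 0 then 9 else y1
  let male := gender = "male" ∨ gender = "男"
  let gua : Int :=
    if birth_year < 2000 then
      if male then PySem.Int.mod (10 - y) 9 else PySem.Int.mod (y + 5) 9
    else
      if male then PySem.Int.mod (9 - y) 9 else PySem.Int.mod (y + 6) 9
  let gua2 : Int := if gua = 0 then 9 else gua
  if gua2 = 5 then (if male then 2 else 8) else gua2

-- ===== PORT B =====
def calculate_ming_gua_alt (birth_year : Int) (gender : String) : Int :=
  let r := PySem.Int.mod (PySem.Int.mod birth_year 100) 9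
  let y : Int := if r = 0 then 9 else r   -- `… or 9`
  let male := gender = "male" ∨ gender = "男"
  let base : Int :=
    if male then (if birth_year < 2000 then 10 else 9) - y
    else y + (if birth_year < 2000 then 5 else 6)
  let g0 := PySem.Int.mod base 9
  let gua : Int := if g0 = 0 then 9 else g0   -- `… or 9`
  if gua = 5 then (if male then 2 else 8) else gua

-- ===== PRECONDITION & SPEC =====
def Spec_calculate_ming_gua (birth_year : Int) (gender : String) (out : Int) : Prop := out = calculate_ming_gua_alt birth_year gender
instance (birth_year : Int) (gender : String) (out : Int) : Decidable (Spec_calculate_ming_gua birth_year gender out) := by unfold Spec_calculate_ming_gua; infer_instance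

-- ===== CLAIM (what is proved, stated in full; the proofs are below) =====
def Claim_equal_calculate_ming_gua : Prop := ∀ (birth_year : Int) (gender : String), Dom_calculate_ming_gua birth_year gender → Spec_calculate_ming_gua birth_year gender (calculate_ming_gua birth_year gender)

-- ===== LEMMAS AND PROOFS =====

-- A's digit-sum loop (with the 0 ↦ 9 fix) equals B's closed-form digital root of birth_year % 100.
theorem pv_yloop_eq (b : Int) :
    (if pvDigitLoop 100 (PySem.Int.mod b 100) = 0 then (9 : Int) else pvDigitLoop 100 (PySem.Int.mod b 100)) =
    (if PySem.Int.mod (PySem.Int.mod b 100) 9 = 0 then (9 : Int) else PySem.Int.mod (PySem.Int.mod b 100) 9) := by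
  have h0 : 0 ≤ PySem.Int.mod b 100 := PySem.Int.mod_nonneg _ (by norm_num)
  have h1 : PySem.Int.mod b 100 < 100 := PySem.Int.mod_lt _ (by norm_num)
  have hn : PySem.Int.mod b 100 = ((PySem.Int.mod b 100).toNat : Int) := (Int.toNat_of_nonneg h0).symm
  have key : ∀ n : Nat, n < 100 →
      (if pvDigitLoop 100 (n : Int) = 0 then (9 : Int) else pvDigitLoop 100 (n : Int)) =
      (if PySem.Int.mod (n : Int) 9 = 0 then (9 : Int) else PySem.Int.mod (n : Int) 9) := by decide
  rw [hn]
  exact key _ (by omega)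

-- ===== VERDICT (by name: the statement is the Claim_ definition above) =====
theorem calculate_ming_gua_spec : Claim_equal_calculate_ming_gua := by
  intro b g _
  unfold Spec_calculate_ming_gua calculate_ming_gua calculate_ming_gua_alt
  have hy := pv_yloop_eq b
  simp only []
  rw [← hy]
  by_cases hm : (g = "male" ∨ g = "男") <;> by_cases hb : b < 2000 <;>
    simp [hm, hb]
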